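-- pv_equiv track=rewrite | github.com/collinsakenga/codewars_solutions | 6 kyu/Simple Simple Simple String Expansion.py | string_expansion
-- ===== SOURCE A (Python) =====
-- def string_expansion(s):
--     res=""
--     for i,j in enumerate(s):
--         flag=False
--         if j.isalpha():
--             index=i-1
--             while index>=0:
--                 if s[index].isdigit():
--                     res+=(int(s[index])*j)
--                     flag=True
--                     break
--                 index-=1
--             if not flag:
--                 res+=j
--     return res
-- ===== SOURCE B (Python) =====
-- def string_expansion(s):
--     # Single forward pass: remember the most recent digit as the current
--     # multiplier instead of rescanning backwards for every letter.
--     mult = None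
--     out = []
--     for ch in s:
--         if ch.isdigit():
--             mult = int(ch)
--         elif ch.isalpha():
--             out.append(ch if mult is None else ch * mult)
--     return "".join(out)
-- ===== Notes on version B (the rewrite author's own statement) =====
-- stated objective: faster
-- what changed: Replaces the per-letter backward scan for the nearest preceding digit with a single forward pass that remembers the last digit seen as the current multiplier.
import Mathlib
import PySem

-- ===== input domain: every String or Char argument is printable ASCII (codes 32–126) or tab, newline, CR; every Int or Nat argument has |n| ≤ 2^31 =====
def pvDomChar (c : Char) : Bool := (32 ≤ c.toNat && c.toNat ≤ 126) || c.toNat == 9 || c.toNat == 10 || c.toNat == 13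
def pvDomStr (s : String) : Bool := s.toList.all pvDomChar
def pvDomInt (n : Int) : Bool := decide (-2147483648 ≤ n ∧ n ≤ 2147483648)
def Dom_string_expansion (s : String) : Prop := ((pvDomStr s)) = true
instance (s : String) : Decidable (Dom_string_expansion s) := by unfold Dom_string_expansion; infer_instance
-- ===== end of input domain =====

-- B replaces A's per-letter backward digit scan with one forward pass tracking the last digit seen (objective: faster).


-- ===== PORT A =====
-- the `while index>=0` backward scan of A, fuel = number of positions left of i;
-- every access s[index] has index < len(s), so List.getD is exact here
def pvBackMul (cs : List Char) : Nat → Option Nat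
  | 0 => none
  | n + 1 =>
    let c := cs.getD n ' '
    if PySem.Chars.isdigit c then some (c.toNat - 48) else pvBackMul cs n

def string_expansion (s : String) : String :=
  String.mk ((PySem.List.enumerate s.toList).foldl
    (fun (res : List Char) (ij : Int × Char) =>
      if PySem.Chars.isalpha ij.2 then
        match pvBackMul s.toList ij.1.toNat with
        | some m => res ++ List.replicate m ij.2   -- int(s[index])*j, flag = True
        | none => res ++ [ij.2]                    -- if not flag: res += j
      else res) [])

-- ===== PORT B =====
def string_expansion_alt (s : String) : String :=
  String.mk ((s.toList.foldl
    (fun (st : Option Nat × List Char) (ch : Char) =>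
      if PySem.Chars.isdigit ch then (some (ch.toNat - 48), st.2)
      else if PySem.Chars.isalpha ch then
        (st.1, st.2 ++ (match st.1 with
                        | none => [ch]
                        | some m => List.replicate m ch))
      else st) ((none : Option Nat), ([] : List Char))).2)

-- ===== PRECONDITION & SPEC =====
def Spec_string_expansion (s : String) (out : String) : Prop := out = string_expansion_alt s
instance (s : String) (out : String) : Decidable (Spec_string_expansion s out) := by unfold Spec_string_expansion; infer_instance

-- ===== CLAIM (what is proved, stated in full; the proofs are below) =====
def Claim_equal_string_expansion : Prop := ∀ (s : String), Dom_string_expansion s → Spec_string_expansion s (string_expansion s)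

-- ===== LEMMAS AND PROOFS =====

-- forward multiplier state after a prefix
def pvM (cs : List Char) : Option Nat :=
  cs.foldl (fun m c => if PySem.Chars.isdigit c then some (c.toNat - 48) else m) none

-- common specification of the output for remaining input `l` under multiplier `m`
def pvSpec (m : Option Nat) : List Char → List Char
  | [] => []
  | c :: rest =>
    if PySem.Chars.isdigit c then pvSpec (some (c.toNat - 48)) rest
    else if PySem.Chars.isalpha c then
      (match m with
       | none => [c]
       | some k => List.replicate k c) ++ pvSpec m rest
    else pvSpec m rest

theorem pvM_append (p : List Char) (c : Char) :
    pvM (p ++ [c]) = if PySem.Chars.isdigit c then some (c.toNat - 48) else pvM p := by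
  simp [pvM, List.foldl_append]

theorem pvBackMul_eq (pre suf : List Char) :
    pvBackMul (pre ++ suf) pre.length = pvM pre := by
  induction pre using List.reverseRecOn generalizing suf with
  | nil => simp [pvBackMul, pvM]
  | append_singleton p c ih =>
    have hlen : (p ++ [c]).length = p.length + 1 := by simp
    rw [hlen]
    show (if PySem.Chars.isdigit ((p ++ [c] ++ suf).getD p.length ' ')
          then some (((p ++ [c] ++ suf).getD p.length ' ').toNat - 48)
          else pvBackMul (p ++ [c] ++ suf) p.length) = _
    have hget : (p ++ [c] ++ suf).getD p.length ' ' = c := by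
      rw [List.append_assoc]
      simp [List.getD_eq_getElem?_getD]
    rw [hget, pvM_append]
    by_cases hd : PySem.Chars.isdigit c
    · simp [hd]
    · simp only [hd]
      rw [List.append_assoc]
      exact ih ([c] ++ suf)

theorem pvA_fold (pre suf res : List Char) :
    (PySem.List.enumerate suf (pre.length : Int)).foldl
      (fun (res : List Char) (ij : Int × Char) =>
        if PySem.Chars.isalpha ij.2 then
          match pvBackMul (pre ++ suf) ij.1.toNat with
          | some m => res ++ List.replicate m ij.2
          | none => res ++ [ij.2]
        else res) res
    = res ++ pvSpec (pvM pre) suf := by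
  induction suf generalizing pre res with
  | nil => simp [PySem.List.enumerate_nil, pvSpec]
  | cons c rest ih =>
    rw [PySem.List.enumerate_cons, List.foldl_cons, List.append_cons pre c rest]
    have hback : pvBackMul ((pre ++ [c]) ++ rest) ((pre.length : Int)).toNat = pvM pre := by
      have := pvBackMul_eq pre ([c] ++ rest)
      rw [← List.append_assoc] at this
      simpa using this
    have hnext : ((pre.length : Int) + 1) = (((pre ++ [c]).length : Nat) : Int) := by
      have h1 : (pre ++ [c]).length = pre.length + 1 := by simp
      rw [h1]; push_cast; ring
    rw [hnext]
    by_cases hd : PySem.Chars.isdigit c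
    · have ha : PySem.Chars.isalpha c = false := by
        simp [PySem.Chars.isdigit, PySem.Chars.isalpha, PySem.Chars.isupper, PySem.Chars.islower,
              Char.le_def, UInt32.le_iff_toNat_le] at hd ⊢
        constructor <;> intro h <;> omega
      rw [if_neg (by simp [ha])]
      rw [ih (pre ++ [c]) res]
      simp [pvSpec, hd, pvM_append]
    · by_cases hA : PySem.Chars.isalpha c
      · rw [if_pos hA, hback]
        rcases hm : pvM pre with _ | k
        all_goals
          rw [ih (pre ++ [c])]
          simp [pvSpec, hd, hA, pvM_append, hm]
      · rw [if_neg (by simp [hA])]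
        rw [ih (pre ++ [c])]
        simp [pvSpec, hd, hA, pvM_append]

theorem pvB_fold (l : List Char) (m : Option Nat) (acc : List Char) :
    (l.foldl
      (fun (st : Option Nat × List Char) (ch : Char) =>
        if PySem.Chars.isdigit ch then (some (ch.toNat - 48), st.2)
        else if PySem.Chars.isalpha ch then
          (st.1, st.2 ++ (match st.1 with
                          | none => [ch]
                          | some m => List.replicate m ch))
        else st) (m, acc)).2 = acc ++ pvSpec m l := by
  induction l generalizing m acc with
  | nil => simp [pvSpec]
  | cons c rest ih =>
    by_cases hd : PySem.Chars.isdigit c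
    · simp [hd, ih, pvSpec]
    · by_cases hA : PySem.Chars.isalpha c
      · rcases m with _ | k <;> simp [hd, hA, ih, pvSpec]
      · simp [hd, hA, ih, pvSpec]

-- ===== VERDICT (by name: the statement is the Claim_ definition above) =====
theorem string_expansion_spec : Claim_equal_string_expansion := by
  intro s _
  unfold Spec_string_expansion string_expansion string_expansion_alt
  have hA := pvA_fold [] s.toList []
  simp only [List.length_nil, Nat.cast_zero, List.nil_append] at hA
  have hB := pvB_fold s.toList none []
  simp only [List.nil_append] at hB
  rw [hA, hB]
  rfl
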